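-- pv_equiv track=rewrite | github.com/Aluriak/concept-generation | standard-algorithms/nextclosure.py | get_context_as_dicts_of_set
-- ===== SOURCE A (Python) =====
-- from collections import defaultdict
-- from collections import defaultdict
--
-- def get_context_as_dicts_of_set(matrix) -> dict:
--     asp_atoms = ''  # ASP encoding of the context
--     context, invcontext = defaultdict(set), defaultdict(set)
--     for object, values in enumerate(matrix, start=1):
--         for attribute, relation in enumerate(values, start=1):
--             if relation:
--                 attribute = chr(ord('a') - 1 + attribute)
--                 context[object].add(attribute)
--                 invcontext[attribute].add(object)
--                 asp_atoms += f'rel({object},{attribute}).'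
--         asp_atoms += '\n'
--     return dict(context), dict(invcontext), asp_atoms
-- ===== SOURCE B (Python) =====
-- def get_context_as_dicts_of_set(matrix):
--     # Staged pipeline: one flat pass turns the matrix into the list of all truthy
--     # (object, attribute) pairs; each mapping is then a plain fold over that flat
--     # list, and the ASP string is assembled row-wise by a join comprehension.
--     pairs = [(obj, chr(ord('a') - 1 + att))
--              for obj, row in enumerate(matrix, start=1)
--              for att, v in enumerate(row, start=1) if v]
--     context = {}
--     for obj, att in pairs:
--         context.setdefault(obj, set()).add(att)
--     invcontext = {}
--     for obj, att in pairs: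
--         invcontext.setdefault(att, set()).add(obj)
--     asp_atoms = ''.join(
--         ''.join(f'rel({obj},{chr(ord("a") - 1 + att)}).'
--                 for att, v in enumerate(row, start=1) if v) + '\n'
--         for obj, row in enumerate(matrix, start=1))
--     return context, invcontext, asp_atoms
-- ===== Notes on version B (the rewrite author's own statement) =====
-- stated objective: alternative
-- what changed: A's single nested loop mutating three accumulators is replaced by a staged pipeline: one comprehension flattens the matrix into a list of truthy (object, attribute) pairs, each of the two dicts is then a plain fold over that flat list, and the ASP string is a join of per-row chunks instead of repeated '+='.
import Mathlib
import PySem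

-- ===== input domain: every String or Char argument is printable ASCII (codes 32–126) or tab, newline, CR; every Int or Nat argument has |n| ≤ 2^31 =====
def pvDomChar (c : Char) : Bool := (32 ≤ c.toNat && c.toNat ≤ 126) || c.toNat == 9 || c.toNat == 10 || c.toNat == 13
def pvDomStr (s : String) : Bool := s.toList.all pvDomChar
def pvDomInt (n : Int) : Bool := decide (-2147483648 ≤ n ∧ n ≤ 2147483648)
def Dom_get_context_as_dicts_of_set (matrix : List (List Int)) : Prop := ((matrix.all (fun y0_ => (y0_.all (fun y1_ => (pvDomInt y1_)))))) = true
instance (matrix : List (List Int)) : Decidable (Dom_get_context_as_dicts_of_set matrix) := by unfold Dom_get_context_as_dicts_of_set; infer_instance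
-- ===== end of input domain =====

-- B replaces A's single nested loop mutating three accumulators by a staged pipeline: a flat (object, attribute) pair list, two plain folds over it for the dicts, and a row-wise join for the string (objective: alternative decomposition, same cost).

-- shared helper: the characters of the f-string f'rel({object},{attribute}).'
def atomCh (obj : Int) (a : String) : List Char :=
  ['r','e','l','('] ++ PySem.Int.toChars obj ++ [','] ++ a.toList ++ [')','.']

-- ===== PORT A =====
def get_context_as_dicts_of_set (matrix : List (List Int)) : (List (Int × List String)) × (List (String × List Int)) × String :=
  let st := (PySem.List.enumerate matrix 1).foldl
    (fun st p =>
      let st2 := (PySem.List.enumerate p.2 1).foldl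
        (fun st2 q =>
          if q.2 ≠ 0 then
            (PySem.Dict.modify st2.1 p.1 PySem.Set.empty (fun s => PySem.Set.add s (String.mk [Char.ofNat (96 + q.1).toNat])),
             PySem.Dict.modify st2.2.1 (String.mk [Char.ofNat (96 + q.1).toNat]) PySem.Set.empty (fun s => PySem.Set.add s p.1),
             st2.2.2 ++ atomCh p.1 (String.mk [Char.ofNat (96 + q.1).toNat]))
          else st2) st
      (st2.1, st2.2.1, st2.2.2 ++ ['\n']))
    ((PySem.Dict.empty : PySem.Dict Int (PySem.Set String)), (PySem.Dict.empty : PySem.Dict String (PySem.Set Int)), ([] : List Char))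
  (st.1.items, st.2.1.items, String.mk st.2.2)

-- ===== PORT B =====
def get_context_as_dicts_of_set_alt (matrix : List (List Int)) : (List (Int × List String)) × (List (String × List Int)) × String :=
  -- stage 1: the flat list of truthy (object, attribute) pairs (the comprehension)
  let pairs : List (Int × String) :=
    (PySem.List.enumerate matrix 1).flatMap (fun p =>
      (PySem.List.enumerate p.2 1).filterMap (fun q =>
        if q.2 ≠ 0 then some (p.1, String.mk [Char.ofNat (96 + q.1).toNat]) else none))
  -- stage 2: each dict is a plain fold over the flat pair list
  let context := pairs.foldl
    (fun d pr => PySem.Dict.modify d pr.1 PySem.Set.empty (fun s => PySem.Set.add s pr.2))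
    (PySem.Dict.empty : PySem.Dict Int (PySem.Set String))
  let invcontext := pairs.foldl
    (fun d pr => PySem.Dict.modify d pr.2 PySem.Set.empty (fun s => PySem.Set.add s pr.1))
    (PySem.Dict.empty : PySem.Dict String (PySem.Set Int))
  -- stage 3: the ASP string, one '\n'-terminated joined chunk per row
  let asp := (PySem.List.enumerate matrix 1).foldl
    (fun acc p =>
      acc ++ PySem.Chars.join []
        ((PySem.List.enumerate p.2 1).filterMap (fun q =>
          if q.2 ≠ 0 then some (atomCh p.1 (String.mk [Char.ofNat (96 + q.1).toNat])) else none))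
        ++ ['\n'])
    ([] : List Char)
  (context.items, invcontext.items, String.mk asp)

-- ===== PRECONDITION & SPEC =====
def Spec_get_context_as_dicts_of_set (matrix : List (List Int)) (out : (List (Int × List String)) × (List (String × List Int)) × String) : Prop := out = get_context_as_dicts_of_set_alt matrix
instance (matrix : List (List Int)) (out : (List (Int × List String)) × (List (String × List Int)) × String) : Decidable (Spec_get_context_as_dicts_of_set matrix out) := by unfold Spec_get_context_as_dicts_of_set; infer_instance

-- ===== CLAIM (what is proved, stated in full; the proofs are below) =====
def Claim_equal_get_context_as_dicts_of_set : Prop := ∀ (matrix : List (List Int)), Dom_get_context_as_dicts_of_set matrix → Spec_get_context_as_dicts_of_set matrix (get_context_as_dicts_of_set matrix)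

-- ===== LEMMAS AND PROOFS =====

-- the one-character attribute strings of a row's truthy cells, in column order
def rvals (att : Int) (values : List Int) : List String :=
  (PySem.List.enumerate values att).filterMap
    (fun q => if q.2 ≠ 0 then some (String.mk [Char.ofNat (96 + q.1).toNat]) else none)

lemma rvals_nil (att : Int) : rvals att [] = [] := rfl

lemma rvals_cons (att : Int) (v : Int) (vs : List Int) :
    rvals att (v :: vs) =
      (if v ≠ 0 then [String.mk [Char.ofNat (96 + att).toNat]] else []) ++ rvals (att + 1) vs := by
  by_cases h : v = 0 <;> simp [rvals, PySem.List.enumerate_cons, h]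

-- the truthy-cell filterMap with any payload f is the map of f over rvals
lemma filterMap_rvals {α : Type} (f : String → α) (values : List Int) :
    ∀ att : Int,
      (PySem.List.enumerate values att).filterMap
        (fun q => if q.2 ≠ 0 then some (f (String.mk [Char.ofNat (96 + q.1).toNat])) else none)
        = (rvals att values).map f := by
  induction values with
  | nil => intro att; simp [rvals_nil, PySem.List.enumerate]
  | cons v vs ih =>
    intro att
    have ih' := ih (att + 1)
    by_cases h : v = 0 <;>
      simp [PySem.List.enumerate_cons, rvals_cons, h] at ih' ⊢ <;>
      exact ih'

lemma join_nil_flatten (parts : List (List Char)) : PySem.Chars.join [] parts = parts.flatten := by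
  induction parts with
  | nil => rfl
  | cons x xs ih =>
    simp only [PySem.Chars.join, List.intercalate] at *
    cases xs <;> simp_all [List.intersperse]

-- A's inner loop, characterized by rvals
lemma innerA (values : List Int) (obj : Int) :
    ∀ (att : Int) (c : PySem.Dict Int (PySem.Set String)) (i : PySem.Dict String (PySem.Set Int)) (asp : List Char),
    (PySem.List.enumerate values att).foldl
      (fun st2 q =>
        if q.2 ≠ 0 then
          (PySem.Dict.modify st2.1 obj PySem.Set.empty (fun s => PySem.Set.add s (String.mk [Char.ofNat (96 + q.1).toNat])),
           PySem.Dict.modify st2.2.1 (String.mk [Char.ofNat (96 + q.1).toNat]) PySem.Set.empty (fun s => PySem.Set.add s obj),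
           st2.2.2 ++ atomCh obj (String.mk [Char.ofNat (96 + q.1).toNat]))
        else st2) (c, i, asp)
    = ((rvals att values).foldl (fun d a => PySem.Dict.modify d obj PySem.Set.empty (fun s => PySem.Set.add s a)) c,
       (rvals att values).foldl (fun d a => PySem.Dict.modify d a PySem.Set.empty (fun s => PySem.Set.add s obj)) i,
       asp ++ (rvals att values).flatMap (atomCh obj)) := by
  induction values with
  | nil => intro att c i asp; simp [rvals_nil, PySem.List.enumerate]
  | cons v vs ih =>
    intro att c i asp
    by_cases h : v = 0
    · simp only [PySem.List.enumerate_cons, List.foldl_cons, rvals_cons, h]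
      simpa using ih (att + 1) c i asp
    · simp only [PySem.List.enumerate_cons, List.foldl_cons, rvals_cons, h]
      simp only [ne_eq, h, not_false_eq_true, if_pos]
      rw [ih]
      simp

-- B's flat pair list, from row s on
def pairsFrom (rows : List (List Int)) (s : Int) : List (Int × String) :=
  (PySem.List.enumerate rows s).flatMap (fun p => (rvals 1 p.2).map (fun a => (p.1, a)))

-- the ASP character stream, from row s on
def aspFrom (rows : List (List Int)) (s : Int) : List Char :=
  (PySem.List.enumerate rows s).flatMap (fun p => (rvals 1 p.2).flatMap (atomCh p.1) ++ ['\n'])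

lemma pairsFrom_cons (values : List Int) (rows : List (List Int)) (s : Int) :
    pairsFrom (values :: rows) s
      = (rvals 1 values).map (fun a => (s, a)) ++ pairsFrom rows (s + 1) := by
  simp [pairsFrom, PySem.List.enumerate_cons]

lemma aspFrom_cons (values : List Int) (rows : List (List Int)) (s : Int) :
    aspFrom (values :: rows) s
      = ((rvals 1 values).flatMap (atomCh s) ++ ['\n']) ++ aspFrom rows (s + 1) := by
  simp [aspFrom, PySem.List.enumerate_cons]

-- A's whole loop equals the three independent derivations from the flat pair list
lemma outerA (rows : List (List Int)) :
    ∀ (s : Int) (c : PySem.Dict Int (PySem.Set String)) (i : PySem.Dict String (PySem.Set Int)) (asp : List Char),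
    (PySem.List.enumerate rows s).foldl
      (fun st p =>
        let st2 := (PySem.List.enumerate p.2 1).foldl
          (fun st2 q =>
            if q.2 ≠ 0 then
              (PySem.Dict.modify st2.1 p.1 PySem.Set.empty (fun s => PySem.Set.add s (String.mk [Char.ofNat (96 + q.1).toNat])),
               PySem.Dict.modify st2.2.1 (String.mk [Char.ofNat (96 + q.1).toNat]) PySem.Set.empty (fun s => PySem.Set.add s p.1),
               st2.2.2 ++ atomCh p.1 (String.mk [Char.ofNat (96 + q.1).toNat]))
            else st2) st
        (st2.1, st2.2.1, st2.2.2 ++ ['\n'])) (c, i, asp)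
    = ((pairsFrom rows s).foldl (fun d pr => PySem.Dict.modify d pr.1 PySem.Set.empty (fun t => PySem.Set.add t pr.2)) c,
       (pairsFrom rows s).foldl (fun d pr => PySem.Dict.modify d pr.2 PySem.Set.empty (fun t => PySem.Set.add t pr.1)) i,
       asp ++ aspFrom rows s) := by
  induction rows with
  | nil => intro s c i asp; simp [pairsFrom, aspFrom, PySem.List.enumerate]
  | cons values rows ih =>
    intro s c i asp
    rw [PySem.List.enumerate_cons]
    simp only [List.foldl_cons]
    rw [innerA values s 1, ih, pairsFrom_cons, aspFrom_cons]
    simp [List.foldl_append, List.foldl_map]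

-- B's string fold accumulates exactly aspFrom
lemma aspB (rows : List (List Int)) :
    ∀ (s : Int) (acc : List Char),
    (PySem.List.enumerate rows s).foldl
      (fun acc p =>
        acc ++ PySem.Chars.join []
          ((PySem.List.enumerate p.2 1).filterMap (fun q =>
            if q.2 ≠ 0 then some (atomCh p.1 (String.mk [Char.ofNat (96 + q.1).toNat])) else none))
          ++ ['\n']) acc
    = acc ++ aspFrom rows s := by
  induction rows with
  | nil => intro s acc; simp [aspFrom, PySem.List.enumerate]
  | cons values rows ih =>
    intro s acc
    rw [PySem.List.enumerate_cons]
    simp only [List.foldl_cons]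
    rw [filterMap_rvals (atomCh s) values 1, join_nil_flatten, ih, aspFrom_cons]
    simp [List.flatMap_def]

-- B's comprehension builds exactly pairsFrom
lemma pairsB (matrix : List (List Int)) :
    (PySem.List.enumerate matrix 1).flatMap (fun p =>
      (PySem.List.enumerate p.2 1).filterMap (fun q =>
        if q.2 ≠ 0 then some (p.1, String.mk [Char.ofNat (96 + q.1).toNat]) else none))
    = pairsFrom matrix 1 := by
  unfold pairsFrom
  congr 1
  funext p
  exact filterMap_rvals (fun a => (p.1, a)) p.2 1

-- ===== VERDICT (by name: the statement is the Claim_ definition above) =====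
theorem get_context_as_dicts_of_set_spec : Claim_equal_get_context_as_dicts_of_set := by
  intro matrix _
  show get_context_as_dicts_of_set matrix = get_context_as_dicts_of_set_alt matrix
  unfold get_context_as_dicts_of_set get_context_as_dicts_of_set_alt
  simp only [pairsB, outerA matrix 1 PySem.Dict.empty PySem.Dict.empty [], aspB matrix 1 []]
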